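-- pv_equiv track=rewrite | github.com/westonsandland/PhishingMonitor | namegen.py | phishLabels
-- ===== SOURCE A (Python) =====
-- def phishLabels(label, list, subs): #recursive method that creates a list of all possible phishing site domains
--     if len(label) == 0:
--         return list
--     toSub = label[0]
--     newList = []
--     for perm in list:
--         newList.append(perm + toSub)
--         if toSub in subs:
--             for subLetter in subs[toSub]:
--                 newList.append(perm + subLetter)
--     return phishLabels(label[1:], newList, subs)
-- ===== SOURCE B (Python) =====
-- def phishLabels(label, list, subs):
--     for ch in label:
--         options = [ch] + subs.get(ch, [])
--         list = [perm + c for perm in list for c in options]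
--     return list
-- ===== Notes on version B (the rewrite author's own statement) =====
-- stated objective: faster
-- what changed: Replaced the recursion over label[1:] with per-perm append loops by a single iterative loop over the label's characters that precomputes the option list [ch] + subs.get(ch, []) once per character and rebuilds the list with one flat comprehension.
import Mathlib
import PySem

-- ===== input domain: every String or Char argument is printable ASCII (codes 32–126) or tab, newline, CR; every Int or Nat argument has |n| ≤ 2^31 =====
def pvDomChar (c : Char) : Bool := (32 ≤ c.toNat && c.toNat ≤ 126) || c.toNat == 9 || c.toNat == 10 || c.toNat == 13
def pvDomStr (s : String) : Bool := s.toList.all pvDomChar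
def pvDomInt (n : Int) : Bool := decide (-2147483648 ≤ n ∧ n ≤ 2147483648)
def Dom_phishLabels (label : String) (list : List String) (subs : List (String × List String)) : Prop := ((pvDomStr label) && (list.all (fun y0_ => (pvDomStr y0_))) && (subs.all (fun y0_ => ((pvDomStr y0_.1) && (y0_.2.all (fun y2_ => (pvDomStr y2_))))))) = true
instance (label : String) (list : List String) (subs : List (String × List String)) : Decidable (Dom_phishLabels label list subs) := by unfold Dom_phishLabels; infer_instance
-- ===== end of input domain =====

-- B replaces A's recursion over label[1:] by one iterative loop with a flat comprehension
-- over the precomputed option list (objective: simpler; return value only, no mutation).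

-- ===== PORT A =====
-- recursion on the label's characters (label[0] / label[1:] become head / tail)
def phishLabelsGo (chars : List Char) (list : List String) (subs : List (String × List String)) : List String :=
  match chars with
  | [] => list
  | toSub :: rest =>
    let newList := list.foldl (fun newList perm =>
      let newList := newList ++ [perm ++ toSub.toString]
      match (PySem.Dict.mk subs).get? toSub.toString with   -- 'if toSub in subs: for subLetter in subs[toSub]'
      | some subLetters => subLetters.foldl (fun newList subLetter => newList ++ [perm ++ subLetter]) newList
      | none => newList) []
    phishLabelsGo rest newList subs

def phishLabels (label : String) (list : List String) (subs : List (String × List String)) : List String :=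
  phishLabelsGo label.toList list subs

-- ===== PORT B =====
def phishLabels_alt (label : String) (list : List String) (subs : List (String × List String)) : List String :=
  label.toList.foldl (fun cur ch =>
    let options := ch.toString :: (PySem.Dict.mk subs).getD ch.toString []
    cur.flatMap (fun perm => options.map (fun c => perm ++ c))) list

-- ===== PRECONDITION & SPEC =====
def Spec_phishLabels (label : String) (list : List String) (subs : List (String × List String)) (out : List String) : Prop := out = phishLabels_alt label list subs
instance (label : String) (list : List String) (subs : List (String × List String)) (out : List String) : Decidable (Spec_phishLabels label list subs out) := by unfold Spec_phishLabels; infer_instance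

-- ===== CLAIM =====
def Claim_equal_phishLabels : Prop := ∀ (label : String) (list : List String) (subs : List (String × List String)), Dom_phishLabels label list subs → Spec_phishLabels label list subs (phishLabels label list subs)

-- ===== LEMMAS AND PROOFS =====
-- one step of A (per perm: plain char, then the substitution letters) is B's flatMap step
theorem step_eq (toSub : Char) (list : List String) (subs : List (String × List String)) :
    list.foldl (fun newList perm =>
      let newList := newList ++ [perm ++ toSub.toString]
      match (PySem.Dict.mk subs).get? toSub.toString with
      | some subLetters => subLetters.foldl (fun newList subLetter => newList ++ [perm ++ subLetter]) newList
      | none => newList) []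
    = list.flatMap (fun perm =>
        (toSub.toString :: (PySem.Dict.mk subs).getD toSub.toString []).map (fun c => perm ++ c)) := by
  have h := PySem.List.foldl_append_eq_flatMap
    (g := fun perm =>
      (toSub.toString :: (PySem.Dict.mk subs).getD toSub.toString []).map (fun c => perm ++ c))
    (l := list) (acc := ([] : List String))
  simp only [List.nil_append] at h
  rw [← h]
  apply PySem.List.foldl_congr_mem
  intro acc perm _
  cases hg : (PySem.Dict.mk subs).get? toSub.toString with
  | none =>
    rw [PySem.Dict.getD_eq_get?_getD, hg]
    simp
  | some subLetters =>
    rw [PySem.Dict.getD_eq_get?_getD, hg]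
    simp only [Option.getD_some, List.map_cons]
    rw [PySem.List.foldl_append_singleton_eq_map]
    simp [List.append_assoc]

theorem go_eq (chars : List Char) (list : List String) (subs : List (String × List String)) :
    phishLabelsGo chars list subs
    = chars.foldl (fun cur ch =>
        let options := ch.toString :: (PySem.Dict.mk subs).getD ch.toString []
        cur.flatMap (fun perm => options.map (fun c => perm ++ c))) list := by
  induction chars generalizing list with
  | nil => rfl
  | cons toSub rest ih =>
    simp only [phishLabelsGo, List.foldl_cons]
    rw [ih, step_eq]

-- ===== VERDICT =====
theorem phishLabels_spec : Claim_equal_phishLabels := by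
  intro label list subs _
  unfold Spec_phishLabels phishLabels phishLabels_alt
  exact go_eq label.toList list subs
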